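-- pv_equiv track=rewrite | github.com/CallumHoughton18/Mushroom-Classification | src/test_api/utils.py | generate_json_with_incorrect_prediction_value
-- ===== SOURCE A (Python) =====
-- def generate_json_with_incorrect_prediction_value(features_definition: dict):
--     """
--     Generates a list of dictonaries with keys from the given features_definitions, key in the dictionary
--     has a corresponding value not allowed by the given definition
--     """
--     mock_requests = []
--     def_keys = list(features_definition.keys())
--
--     for i in range(len(def_keys)):
--         mock_request = {}
--         current_keys = def_keys.copy()
--         for key in current_keys:
--             mock_request[key] = features_definition[key][0]
--
--         # Replace one keys value with invalid prediction value
--         mock_request[current_keys[i]] = 'q'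
--         mock_requests.append(mock_request)
--
--     return mock_requests
-- ===== SOURCE B (Python) =====
-- def generate_json_with_incorrect_prediction_value(features_definition: dict):
--     """
--     Generates a list of dictonaries with keys from the given features_definitions, key in the dictionary
--     has a corresponding value not allowed by the given definition
--     """
--     def rows(pairs, prefix):
--         if not pairs:
--             return []
--         (key, values), rest = pairs[0], pairs[1:]
--         bad = dict(prefix + [(key, 'q')] + [(k, vs[0]) for k, vs in rest])
--         return [bad] + rows(rest, prefix + [(key, values[0])])
--
--     return rows(list(features_definition.items()), [])
-- ===== Notes on version B (the rewrite author's own statement) =====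
-- stated objective: alternative
-- what changed: B builds each row by splicing (prefix pairs) + [(key,'q')] + (suffix pairs) in a single recursive sweep that carries the growing prefix of good pairs, instead of A's nested loop that rebuilds every dict key-by-key with a lookup and then overwrites one entry.
import Mathlib
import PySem

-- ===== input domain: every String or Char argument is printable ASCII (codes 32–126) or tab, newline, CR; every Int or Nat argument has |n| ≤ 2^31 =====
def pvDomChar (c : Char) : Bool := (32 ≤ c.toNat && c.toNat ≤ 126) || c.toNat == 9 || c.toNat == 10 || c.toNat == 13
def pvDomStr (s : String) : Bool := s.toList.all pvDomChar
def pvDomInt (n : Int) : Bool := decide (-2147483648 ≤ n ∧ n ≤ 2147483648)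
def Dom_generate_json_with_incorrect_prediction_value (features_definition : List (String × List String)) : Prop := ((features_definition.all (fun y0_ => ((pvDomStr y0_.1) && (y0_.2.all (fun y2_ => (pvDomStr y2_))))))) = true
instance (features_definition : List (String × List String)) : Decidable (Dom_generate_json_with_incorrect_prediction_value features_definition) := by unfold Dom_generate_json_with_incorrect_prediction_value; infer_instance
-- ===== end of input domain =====

-- B builds each row by splicing prefix + [(key,'q')] + suffix in one recursive sweep
-- carrying the prefix of good pairs, instead of A's nested key-by-key dict rebuild
-- with a lookup per key (objective: alternative).

-- ===== PORT A =====
-- literal transliteration of A: outer loop over range(len(def_keys)), inner loop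
-- rebuilding mock_request key by key via features_definition[key][0], then overwrite.
def generate_json_with_incorrect_prediction_value (features_definition : List (String × List String)) : List (List (String × String)) :=
  let def_keys := features_definition.map Prod.fst
  (PySem.List.pyRange 0 (def_keys.length : Int) 1).foldl
    (fun (mock_requests : List (List (String × String))) i =>
      -- inner loop: mock_request[key] = features_definition[key][0]  (the .getD "" defaults
      -- are unreachable under Pre_: the key is present and its value list is nonempty)
      let mock_request : PySem.Dict String String :=
        def_keys.foldl
          (fun m key =>
            m.insert key (PySem.List.pyGetD ((PySem.Dict.mk features_definition).getD key []) 0 ""))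
          PySem.Dict.empty
      let mock_request := mock_request.insert (PySem.List.pyGetD def_keys i "") "q"
      mock_requests ++ [mock_request.items])
    []

-- ===== PORT B =====
-- literal transliteration of Source B's recursive helper 'rows(pairs, prefix)':
-- bad = dict(prefix + [(key,'q')] + [(k, vs[0]) for k, vs in rest]);
-- [bad] + rows(rest, prefix + [(key, values[0])])
def pvAltRows (pairs : List (String × List String)) (pfx : List (String × String)) : List (List (String × String)) :=
  match pairs with
  | [] => []
  | (key, values) :: rest =>
      (PySem.Dict.ofList (pfx ++ [(key, "q")] ++ rest.map (fun kv => (kv.1, PySem.List.pyGetD kv.2 0 "")))).items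
        :: pvAltRows rest (pfx ++ [(key, PySem.List.pyGetD values 0 "")])

def generate_json_with_incorrect_prediction_value_alt (features_definition : List (String × List String)) : List (List (String × String)) :=
  pvAltRows features_definition []

-- ===== PRECONDITION & SPEC =====
-- Pre_ requires the dict's keys to be distinct (the List argument represents a Python
-- dict, which cannot carry duplicate keys) and every value list nonempty (on an empty
-- value list A raises IndexError at features_definition[key][0]).
def Pre_generate_json_with_incorrect_prediction_value (features_definition : List (String × List String)) : Prop :=
  (features_definition.map Prod.fst).Nodup ∧ ∀ kv ∈ features_definition, kv.2 ≠ []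
instance (features_definition : List (String × List String)) : Decidable (Pre_generate_json_with_incorrect_prediction_value features_definition) := by unfold Pre_generate_json_with_incorrect_prediction_value; infer_instance
def pvWitness_generate_json_with_incorrect_prediction_value : (List (String × List String)) :=
  [("odor", ["almond", "foul"]), ("cap-shape", ["bell"])]
def Spec_generate_json_with_incorrect_prediction_value (features_definition : List (String × List String)) (out : List (List (String × String))) : Prop := out = generate_json_with_incorrect_prediction_value_alt features_definition
instance (features_definition : List (String × List String)) (out : List (List (String × String))) : Decidable (Spec_generate_json_with_incorrect_prediction_value features_definition out) := by unfold Spec_generate_json_with_incorrect_prediction_value; infer_instance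

-- ===== CLAIM (what is proved, stated in full; the proofs are below) =====
def Claim_equal_generate_json_with_incorrect_prediction_value : Prop := ∀ (features_definition : List (String × List String)), Dom_generate_json_with_incorrect_prediction_value features_definition → Pre_generate_json_with_incorrect_prediction_value features_definition → Spec_generate_json_with_incorrect_prediction_value features_definition (generate_json_with_incorrect_prediction_value features_definition)

-- ===== LEMMAS AND PROOFS =====

-- the pair each good entry contributes: (key, values[0])
def pvGood (kv : String × List String) : String × String := (kv.1, PySem.List.pyGetD kv.2 0 "")

-- dict(l) returns l itself when l's keys are distinct
theorem pv_items_ofList (l : List (String × String)) (hnd : (l.map Prod.fst).Nodup) :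
    (PySem.Dict.ofList l).items = l := by
  have h := PySem.Dict.items_foldl_insert_fresh l Prod.fst Prod.snd PySem.Dict.empty
      (fun _ _ => PySem.Dict.contains_empty _) hnd
  simpa [PySem.Dict.ofList, PySem.Dict.update, PySem.Dict.empty] using h

-- replacing key k is the identity on a pair list that does not carry key k
theorem pv_map_replace_id (l : List (String × String)) (k : String) (h : k ∉ l.map Prod.fst) :
    l.map (fun p => if p.1 == k then (k, "q") else p) = l := by
  conv_rhs => rw [← List.map_id l]
  apply List.map_congr_left
  intro p hp
  have hne : p.1 ≠ k := by
    intro he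
    exact h (he ▸ List.mem_map_of_mem hp)
  simp [hne]

-- B's recursive sweep equals, row by row, "replace key in the full good-pair table"
theorem pv_rows_eq (l2 l1 : List (String × List String))
    (hnd : (((l1 ++ l2).map Prod.fst)).Nodup) :
    pvAltRows l2 (l1.map pvGood)
      = (l2.map Prod.fst).map
          (fun k => ((l1 ++ l2).map pvGood).map (fun p => if p.1 == k then (k, "q") else p)) := by
  induction l2 generalizing l1 with
  | nil => simp [pvAltRows]
  | cons kv rest ih =>
    obtain ⟨k, vs⟩ := kv
    have hkeys : ((l1 ++ (k, vs) :: rest).map Prod.fst)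
        = l1.map Prod.fst ++ k :: rest.map Prod.fst := by simp
    rw [hkeys] at hnd
    have hd := List.nodup_append.mp hnd
    have hk_l1 : k ∉ l1.map Prod.fst := by intro hm; exact hd.2.2 k hm k (List.mem_cons_self ..) rfl
    have hk_rest : k ∉ rest.map Prod.fst := (List.nodup_cons.mp hd.2.1).1
    have hmapfst : ∀ (l : List (String × List String)), (l.map pvGood).map Prod.fst = l.map Prod.fst := by
      intro l; simp [pvGood]
    show (PySem.Dict.ofList (l1.map pvGood ++ [(k, "q")] ++ rest.map (fun kv => (kv.1, PySem.List.pyGetD kv.2 0 "")))).items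
        :: pvAltRows rest (l1.map pvGood ++ [(k, PySem.List.pyGetD vs 0 "")]) = _
    have hrest_good : rest.map (fun kv => (kv.1, PySem.List.pyGetD kv.2 0 "")) = rest.map pvGood := rfl
    rw [hrest_good]
    have hhead : (PySem.Dict.ofList (l1.map pvGood ++ [(k, "q")] ++ rest.map pvGood)).items
        = l1.map pvGood ++ [(k, "q")] ++ rest.map pvGood := by
      apply pv_items_ofList
      have : (l1.map pvGood ++ [(k, "q")] ++ rest.map pvGood).map Prod.fst
          = l1.map Prod.fst ++ k :: rest.map Prod.fst := by
        simp [hmapfst]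
      rw [this]; exact hnd
    have hpfx : l1.map pvGood ++ [(k, PySem.List.pyGetD vs 0 "")] = (l1 ++ [(k, vs)]).map pvGood := by
      simp [pvGood]
    have hnd' : (((l1 ++ [(k, vs)]) ++ rest).map Prod.fst).Nodup := by
      have : (l1 ++ [(k, vs)]) ++ rest = l1 ++ (k, vs) :: rest := by simp
      rw [this, hkeys]; exact hnd
    rw [hhead, hpfx, ih (l1 ++ [(k, vs)]) hnd']
    have hassoc : (l1 ++ [(k, vs)]) ++ rest = l1 ++ (k, vs) :: rest := by simp
    rw [hassoc]
    show _ = ((l1 ++ (k, vs) :: rest).map pvGood).map (fun p => if p.1 == k then (k, "q") else p)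
        :: (rest.map Prod.fst).map _
    congr 1
    have hsplit : (l1 ++ (k, vs) :: rest).map pvGood
        = l1.map pvGood ++ pvGood (k, vs) :: rest.map pvGood := by simp
    rw [hsplit, List.map_append, List.map_cons]
    rw [pv_map_replace_id (l1.map pvGood) k (by rw [hmapfst]; exact hk_l1)]
    rw [pv_map_replace_id (rest.map pvGood) k (by rw [hmapfst]; exact hk_rest)]
    simp [pvGood]

theorem generate_eq (fd : List (String × List String))
    (hnd : (fd.map Prod.fst).Nodup) :
    generate_json_with_incorrect_prediction_value fd
      = generate_json_with_incorrect_prediction_value_alt fd := by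
  unfold generate_json_with_incorrect_prediction_value generate_json_with_incorrect_prediction_value_alt
  rw [PySem.List.foldl_append_singleton_eq_map]
  set base := (fd.map Prod.fst).foldl
      (fun (m : PySem.Dict String String) key =>
        m.insert key (PySem.List.pyGetD ((PySem.Dict.mk fd).getD key []) 0 "")) PySem.Dict.empty with hbase
  have hitems : base.items = fd.map pvGood := by
    rw [hbase, show ((fd.map Prod.fst).foldl
          (fun (m : PySem.Dict String String) key =>
            m.insert key (PySem.List.pyGetD ((PySem.Dict.mk fd).getD key []) 0 "")) PySem.Dict.empty)
        = ((fd.map Prod.fst).foldl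
          (fun (m : PySem.Dict String String) key =>
            m.insert (id key) (PySem.List.pyGetD ((PySem.Dict.mk fd).getD key []) 0 "")) PySem.Dict.empty) from rfl]
    rw [PySem.Dict.items_foldl_insert_fresh (fd.map Prod.fst) id
          (fun key => PySem.List.pyGetD ((PySem.Dict.mk fd).getD key []) 0 "") PySem.Dict.empty
          (fun _ _ => PySem.Dict.contains_empty _) (by simpa using hnd)]
    simp only [List.map_map, PySem.Dict.empty, List.nil_append]
    apply List.map_congr_left
    intro kv hkv
    have hk : (PySem.Dict.mk fd).getD kv.1 [] = kv.2 :=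
      PySem.Dict.getD_of_mem_items (PySem.Dict.mk fd) (by simpa [PySem.Dict.items] using hkv)
        (by simpa [PySem.Dict.keys_mk] using hnd) []
    simp [hk, pvGood]
  have hbkeys : base.keys = fd.map Prod.fst := by
    rw [PySem.Dict.keys, hitems]; simp [pvGood]
  have hcomp : (PySem.List.pyRange 0 ((fd.map Prod.fst).length : Int) 1).map
      (fun i => (base.insert (PySem.List.pyGetD (fd.map Prod.fst) i "") "q").items)
      = ((PySem.List.pyRange 0 ((fd.map Prod.fst).length : Int) 1).map
          (fun i => PySem.List.pyGetD (fd.map Prod.fst) i "")).map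
        (fun k => (base.insert k "q").items) := by
    rw [List.map_map]; rfl
  simp only [List.nil_append]
  rw [hcomp, PySem.List.map_pyGetD_pyRange_zero']
  have hrows := pv_rows_eq fd [] (by simpa using hnd)
  simp only [List.map_nil, List.nil_append] at hrows
  rw [hrows]
  apply List.map_congr_left
  intro k hk
  have hc : base.contains k = true := by
    rw [PySem.Dict.contains_iff_mem_keys, hbkeys]; exact hk
  rw [PySem.Dict.items_insert_of_contains base "q" hc, hitems]

-- ===== VERDICT (by name: the statement is the Claim_ definition above) =====
theorem generate_json_with_incorrect_prediction_value_spec : Claim_equal_generate_json_with_incorrect_prediction_value := by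
  intro fd _ hpre
  unfold Spec_generate_json_with_incorrect_prediction_value
  exact generate_eq fd hpre.1
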